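-- pv_equiv track=rewrite | github.com/cindyli/baby-bliss-bot | jobs/bliss-gloss/prompting_with_id_and_gloss_mapping/generate_first_gloss_and_blissId_pairs.py | process_json_mappings
-- ===== SOURCE A (Python) =====
-- from collections import defaultdict
--
-- def process_json_mappings(gloss_dict):
--     # Dictionary to track first glosses and their associated Bliss IDs
--     gloss_to_blissId = defaultdict(list)
--
--     # Process each record
--     for blissId, glosses in gloss_dict.items():
--         if glosses:  # Check if the gloss array is not empty
--             first_gloss = glosses[0]
--             # Track all glosses and their Bliss IDs for duplicate checking
--             gloss_to_blissId[first_gloss].append(blissId)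
--
--     # Separate mappings into unique and duplicates
--     unique_equations = []
--     duplicate_mappings = []
--     duplicates_report = []
--
--     for first_gloss, bliss_ids in gloss_to_blissId.items():
--         if len(bliss_ids) == 1:
--             # Unique mapping
--             unique_equations.append(f'"{first_gloss}"={bliss_ids[0]}')
--         else:
--             # Handle duplicates
--             unique_equations.append(f'"{first_gloss}"={bliss_ids[0]}')  # Use the first Bliss ID
--             for bliss_id in bliss_ids[1:]:
--                 duplicate_mappings.append(f'"{first_gloss}"={bliss_id}')
--             duplicates_report.append(
--                 f'"{first_gloss}" is mapped to multiple Bliss IDs: {", ".join(bliss_ids)}'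
--             )
--
--     return unique_equations, duplicate_mappings, duplicates_report
-- ===== SOURCE B (Python) =====
-- def process_json_mappings(gloss_dict):
--     # Dict-free nested-scan algorithm: flatten the records to (first_gloss, blissId)
--     # pairs, then for each pair that is the FIRST occurrence of its gloss (no earlier
--     # pair has the same gloss), gather all ids of that gloss by a scan of the whole
--     # pair list and emit all three outputs for that group at once.
--     recs = [(glosses[0], blissId) for blissId, glosses in gloss_dict.items() if glosses]
--     unique_equations = []
--     duplicate_mappings = []
--     duplicates_report = []
--     for i, (g, bid) in enumerate(recs):
--         if any(g2 == g for g2, _ in recs[:i]):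
--             continue  # not the first occurrence: already handled with its group
--         ids = [b for g2, b in recs if g2 == g]
--         unique_equations.append(f'"{g}"={bid}')
--         if len(ids) > 1:
--             duplicate_mappings += [f'"{g}"={b}' for b in ids[1:]]
--             duplicates_report.append(
--                 f'"{g}" is mapped to multiple Bliss IDs: {", ".join(ids)}'
--             )
--     return unique_equations, duplicate_mappings, duplicates_report
-- ===== Notes on version B (the rewrite author's own statement) =====
-- stated objective: alternative
-- what changed: B drops the dict grouping entirely: it flattens the records to (first_gloss, blissId) pairs and, for each pair that a scan of the earlier pairs shows to be the first occurrence of its gloss, gathers that gloss's ids by re-scanning the whole pair list and emits all three outputs for the group inline (quadratic nested scans instead of A's hash grouping plus second pass).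
import Mathlib
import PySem

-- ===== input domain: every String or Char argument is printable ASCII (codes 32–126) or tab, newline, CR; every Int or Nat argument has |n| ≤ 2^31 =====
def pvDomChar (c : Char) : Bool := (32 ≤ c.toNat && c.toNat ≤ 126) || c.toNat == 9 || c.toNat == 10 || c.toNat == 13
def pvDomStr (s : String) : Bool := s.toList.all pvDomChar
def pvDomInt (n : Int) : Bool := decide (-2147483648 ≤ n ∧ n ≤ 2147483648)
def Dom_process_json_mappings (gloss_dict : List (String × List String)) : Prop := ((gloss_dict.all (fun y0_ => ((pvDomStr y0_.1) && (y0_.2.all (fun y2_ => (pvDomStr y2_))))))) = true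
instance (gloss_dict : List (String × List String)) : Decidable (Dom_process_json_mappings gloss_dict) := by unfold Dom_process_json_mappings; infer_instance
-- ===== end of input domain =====

-- B replaces A's dict-grouping with a dict-free nested-scan algorithm (first-occurrence
-- test against the earlier pairs, group ids gathered by re-scanning the whole pair list),
-- emitting all three outputs per group inline; objective: alternative (O(n^2) vs O(n)).


-- ===== PORT A =====
-- A-side helpers: the two loop bodies of A
def pvStepA (d : PySem.Dict String (List String)) (p : String × List String) :
    PySem.Dict String (List String) :=
  match p.2 with
  | [] => d
  | first_gloss :: _ => d.modify first_gloss [] (fun ids => ids ++ [p.1])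

def pvClassifyA (acc : List String × List String × List String) (p : String × List String) :
    List String × List String × List String :=
  if p.2.length = 1 then
    (acc.1 ++ ["\"" ++ p.1 ++ "\"=" ++ PySem.List.pyGetD p.2 0 ""], acc.2.1, acc.2.2)
  else
    (acc.1 ++ ["\"" ++ p.1 ++ "\"=" ++ PySem.List.pyGetD p.2 0 ""],
     (p.2.drop 1).foldl (fun dm bliss_id => dm ++ ["\"" ++ p.1 ++ "\"=" ++ bliss_id]) acc.2.1,
     acc.2.2 ++ ["\"" ++ p.1 ++ "\" is mapped to multiple Bliss IDs: " ++ PySem.Str.join ", " p.2])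

def process_json_mappings (gloss_dict : List (String × List String)) :
    List String × List String × List String :=
  let gloss_to_blissId := gloss_dict.foldl pvStepA PySem.Dict.empty
  gloss_to_blissId.items.foldl pvClassifyA ([], [], [])

-- ===== PORT B =====
-- B-side helpers: the two f-string shapes, the record comprehension, and B's loop body
def pvEq (g i : String) : String := "\"" ++ g ++ "\"=" ++ i

def pvRep (p : String × List String) : String :=
  "\"" ++ p.1 ++ "\" is mapped to multiple Bliss IDs: " ++ PySem.Str.join ", " p.2

-- [(glosses[0], blissId) for blissId, glosses in gloss_dict.items() if glosses]
def pvRecs (gloss_dict : List (String × List String)) : List (String × String) :=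
  gloss_dict.flatMap (fun p => match p.2 with | [] => [] | g :: _ => [(g, p.1)])

def pvStepB (recs : List (String × String))
    (acc : List String × List String × List String) (ip : Int × (String × String)) :
    List String × List String × List String :=
  if (PySem.List.slice recs none (some ip.1)).any (fun r => r.1 == ip.2.1) then acc
  else
    let ids := (recs.filter (fun r => r.1 == ip.2.1)).map Prod.snd
    let u := acc.1 ++ [pvEq ip.2.1 ip.2.2]
    if 1 < ids.length then
      (u, acc.2.1 ++ (ids.drop 1).map (pvEq ip.2.1), acc.2.2 ++ [pvRep (ip.2.1, ids)])
    else (u, acc.2.1, acc.2.2)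

def process_json_mappings_alt (gloss_dict : List (String × List String)) :
    List String × List String × List String :=
  let recs := pvRecs gloss_dict
  (PySem.List.enumerate recs 0).foldl (pvStepB recs) ([], [], [])

-- ===== PRECONDITION & SPEC =====
def Spec_process_json_mappings (gloss_dict : List (String × List String)) (out : List String × List String × List String) : Prop := out = process_json_mappings_alt gloss_dict
instance (gloss_dict : List (String × List String)) (out : List String × List String × List String) : Decidable (Spec_process_json_mappings gloss_dict out) := by unfold Spec_process_json_mappings; infer_instance

-- ===== CLAIM (what is proved, stated in full; the proofs are below) =====
def Claim_equal_process_json_mappings : Prop := ∀ (gloss_dict : List (String × List String)), Dom_process_json_mappings gloss_dict → Spec_process_json_mappings gloss_dict (process_json_mappings gloss_dict)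

-- ===== LEMMAS AND PROOFS =====

-- first-occurrence grouping of (gloss, id) pairs: the common ground of both programs
def pvGroup : List (String × String) → List (String × List String)
  | [] => []
  | r :: t =>
    (r.1, r.2 :: (t.filter (fun q => q.1 == r.1)).map Prod.snd) ::
      pvGroup (t.filter (fun q => q.1 != r.1))
  termination_by l => l.length
  decreasing_by
    simp only [List.length_unattach]
    exact Nat.lt_succ_of_le (le_trans (List.length_filter_le _ _) (by simp))

theorem pvGroup_nil : pvGroup [] = [] := by rw [pvGroup]

theorem pvGroup_cons (r : String × String) (t : List (String × String)) :
    pvGroup (r :: t) = (r.1, r.2 :: (t.filter (fun q => q.1 == r.1)).map Prod.snd) ::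
      pvGroup (t.filter (fun q => q.1 != r.1)) := by rw [pvGroup]

-- the per-item string A emits into unique_equations
def pvItemEq (p : String × List String) : String := pvEq p.1 (PySem.List.pyGetD p.2 0 "")

-- the flattened-record step A's dict loop amounts to
def pvStepA' (d : PySem.Dict String (List String)) (r : String × String) :
    PySem.Dict String (List String) :=
  d.modify r.1 [] (fun ids => ids ++ [r.2])

theorem pvFoldA_recs (l : List (String × List String)) (d : PySem.Dict String (List String)) :
    l.foldl pvStepA d = (pvRecs l).foldl pvStepA' d := by
  induction l generalizing d with
  | nil => rfl
  | cons p t ih =>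
    cases hp : p.2 with
    | nil =>
      rw [List.foldl_cons, show pvStepA d p = d by simp [pvStepA, hp], ih,
        show pvRecs (p :: t) = pvRecs t by simp [pvRecs, List.flatMap_cons, hp]]
    | cons g gs =>
      rw [List.foldl_cons, show pvStepA d p = pvStepA' d (g, p.1) by simp [pvStepA, pvStepA', hp],
        ih, show pvRecs (p :: t) = (g, p.1) :: pvRecs t by
          simp [pvRecs, List.flatMap_cons, hp], List.foldl_cons]

theorem pvGroup_ne_nil_aux (n : Nat) (l : List (String × String)) (hn : l.length ≤ n) :
    ∀ p ∈ pvGroup l, p.2 ≠ [] := by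
  induction n generalizing l with
  | zero =>
    rw [Nat.le_zero, List.length_eq_zero_iff] at hn
    subst hn
    intro p hp; simp [pvGroup_nil] at hp
  | succ n ih =>
    cases l with
    | nil => intro p hp; simp [pvGroup_nil] at hp
    | cons r t =>
      intro p hp
      rw [pvGroup_cons] at hp
      rcases List.mem_cons.mp hp with h | h
      · rw [h]; simp
      · exact ih _ (le_trans (List.length_filter_le _ _) (by simpa using hn)) p h

theorem pvGroup_ne_nil (l : List (String × String)) :
    ∀ p ∈ pvGroup l, p.2 ≠ [] := pvGroup_ne_nil_aux l.length l le_rfl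

-- characterisation of A's grouping loop: starting dict d, the items after the loop
theorem pvDictGroup (l : List (String × String)) (d : PySem.Dict String (List String))
    (hnd : d.keys.Nodup) :
    (l.foldl pvStepA' d).items =
      d.items.map (fun q => (q.1, q.2 ++ (l.filter (fun r => r.1 == q.1)).map Prod.snd)) ++
        pvGroup (l.filter (fun r => !(d.contains r.1))) ∧
    (l.foldl pvStepA' d).keys.Nodup := by
  induction l generalizing d with
  | nil => simp [pvGroup_nil, hnd]
  | cons r t ih =>
    have hmod : pvStepA' d r = d.insert r.1 (d.getD r.1 [] ++ [r.2]) := rfl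
    by_cases hc : d.contains r.1 = true
    · set d' := d.insert r.1 (d.getD r.1 [] ++ [r.2]) with hd'
      have hnd' : d'.keys.Nodup := PySem.Dict.nodup_keys_insert d r.1 _ hnd
      obtain ⟨hitems, hnodup⟩ := ih d' hnd'
      refine ⟨?_, by simpa [List.foldl_cons, hmod] using hnodup⟩
      rw [List.foldl_cons, hmod, hitems]
      congr 1
      · -- maps agree entry-wise
        rw [PySem.Dict.items_insert_of_contains d _ hc, List.map_map]
        refine List.map_congr_left (fun q hq => ?_)
        by_cases hqg : (q.1 == r.1) = true
        · have hg : q.1 = r.1 := by simpa using hqg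
          have hv : d.getD r.1 [] = q.2 := by
            have := PySem.Dict.getD_of_mem_items d (k := q.1) (v := q.2) hq hnd []
            rw [← hg]; exact this
          simp [Function.comp, hqg, hg, hv, List.filter_cons]
        · have hne' : ¬ q.1 = r.1 := by simpa using hqg
          have hne'' : (r.1 == q.1) = false := by simpa using fun h => hne' h.symm
          simp [Function.comp, hqg, List.filter_cons, hne'']
      · -- the not-yet-seen filters agree
        congr 1
        rw [List.filter_cons_of_neg (by rw [hc]; simp)]
        refine List.filter_congr (fun x _ => ?_)
        simp only [PySem.Dict.contains_insert, hd']
        by_cases hx : (x.1 == r.1) = true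
        · have : x.1 = r.1 := by simpa using hx
          simp [hx, this, hc]
        · simp [hx]
    · have hc' : d.contains r.1 = false := by simpa using hc
      have hget : d.getD r.1 [] = [] := PySem.Dict.getD_of_not_contains d _ hc'
      set d' := d.insert r.1 [r.2] with hd'
      have hnd' : d'.keys.Nodup := PySem.Dict.nodup_keys_insert d r.1 _ hnd
      obtain ⟨hitems, hnodup⟩ := ih d' hnd'
      have hstep : pvStepA' d r = d' := by rw [hmod, hget]; rfl
      refine ⟨?_, by simpa [List.foldl_cons, hstep] using hnodup⟩
      rw [List.foldl_cons, hstep, hitems, PySem.Dict.items_insert_of_not_contains d _ hc',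
        List.map_append]
      rw [List.filter_cons_of_pos (by simp [hc']), pvGroup_cons]
      have hmap : d.items.map (fun q => (q.1, q.2 ++ (t.filter (fun x => x.1 == q.1)).map Prod.snd))
          = d.items.map (fun q => (q.1, q.2 ++ ((r :: t).filter (fun x => x.1 == q.1)).map Prod.snd)) := by
        refine List.map_congr_left (fun q hq => ?_)
        have hqk : q.1 ∈ d.keys := PySem.Dict.mem_keys_of_mem_items d hq
        have hne' : (r.1 == q.1) = false := by
          refine beq_eq_false_iff_ne.mpr (fun h => ?_)
          exact absurd ((PySem.Dict.contains_iff_mem_keys d r.1).mpr (h ▸ hqk)) (by simp [hc'])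
        simp [List.filter_cons, hne']
      have hids : (t.filter (fun x => !d.contains x.1)).filter (fun q => q.1 == r.1)
          = t.filter (fun q => q.1 == r.1) := by
        rw [List.filter_filter]
        refine List.filter_congr (fun x _ => ?_)
        by_cases hx : (x.1 == r.1) = true
        · have hx' : x.1 = r.1 := by simpa using hx
          simp [hx, hx', hc']
        · simp [hx]
      have htail : t.filter (fun x => !d'.contains x.1)
          = (t.filter (fun x => !d.contains x.1)).filter (fun q => q.1 != r.1) := by
        rw [List.filter_filter, hd']
        refine List.filter_congr (fun x _ => ?_)
        simp [PySem.Dict.contains_insert, Bool.not_or, bne, Bool.and_comm]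
      rw [hmap, List.append_assoc, hids, htail]
      simp

-- A's classification loop, characterised over any item list with nonempty values
theorem pvClassify_char (its : List (String × List String)) (hne : ∀ p ∈ its, p.2 ≠ [])
    (u dm dr : List String) :
    its.foldl pvClassifyA (u, dm, dr) =
      (u ++ its.map pvItemEq,
       dm ++ (its.filter (fun p => decide (1 < p.2.length))).flatMap
          (fun p => (p.2.drop 1).map (pvEq p.1)),
       dr ++ (its.filter (fun p => decide (1 < p.2.length))).map pvRep) := by
  induction its generalizing u dm dr with
  | nil => simp
  | cons p rest ih =>
    have hprest : ∀ q ∈ rest, q.2 ≠ [] := fun q hq => hne q (List.mem_cons_of_mem p hq)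
    by_cases h1 : p.2.length = 1
    · have hf : (decide (1 < p.2.length)) = false := by simp [h1]
      have hx : pvClassifyA (u, dm, dr) p = (u ++ [pvItemEq p], dm, dr) := by
        unfold pvClassifyA; rw [if_pos h1]; rfl
      rw [List.foldl_cons, hx, ih hprest]
      simp [hf]
    · have hlen : 1 < p.2.length := by
        have : p.2 ≠ [] := hne p (List.mem_cons_self)
        have : 0 < p.2.length := List.length_pos_iff.mpr this
        omega
      have ht : (decide (1 < p.2.length)) = true := by simp [hlen]
      have hx : pvClassifyA (u, dm, dr) p
          = (u ++ [pvItemEq p], dm ++ (p.2.drop 1).map (pvEq p.1), dr ++ [pvRep p]) := by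
        unfold pvClassifyA
        rw [if_neg h1,
          PySem.List.foldl_append_singleton_eq_map
            (fun i => "\"" ++ p.1 ++ "\"=" ++ i) (p.2.drop 1) dm]
        rfl
      rw [List.foldl_cons, hx, ih hprest]
      simp [ht]

-- pyGetD at 0 is headD
theorem pvGetD_zero (l : List String) : PySem.List.pyGetD l 0 "" = l.headD "" := by
  cases l with
  | nil => rfl
  | cons a t => simp [PySem.List.pyGetD, PySem.List.pyGet?, PySem.List.pyIdx?]

-- dropping groups with a single id does not change the flattened tails
theorem pvFlatMap_filter (gs : List (String × List String)) :
    gs.flatMap (fun q => (q.2.drop 1).map (pvEq q.1)) =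
      (gs.filter (fun p => decide (1 < p.2.length))).flatMap
        (fun q => (q.2.drop 1).map (pvEq q.1)) := by
  induction gs with
  | nil => rfl
  | cons q t ih =>
    by_cases h : 1 < q.2.length
    · rw [List.flatMap_cons, List.filter_cons_of_pos (by simpa using h), List.flatMap_cons, ih]
    · have hnil : q.2.drop 1 = [] := List.drop_eq_nil_of_le (by omega)
      rw [List.flatMap_cons, List.filter_cons_of_neg (by simpa using h), hnil]
      simpa using ih

-- characterisation of B's single loop over the enumerated records
theorem pvBLoop (recs pre l : List (String × String)) (u dm dr : List String)
    (h : recs = pre ++ l) :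
    (PySem.List.enumerate l (pre.length : Int)).foldl (pvStepB recs) (u, dm, dr) =
      (u ++ (pvGroup (l.filter (fun r => !(pre.any (fun q => q.1 == r.1))))).map
          (fun q => pvEq q.1 (q.2.headD "")),
       dm ++ (pvGroup (l.filter (fun r => !(pre.any (fun q => q.1 == r.1))))).flatMap
          (fun q => (q.2.drop 1).map (pvEq q.1)),
       dr ++ ((pvGroup (l.filter (fun r => !(pre.any (fun q => q.1 == r.1))))).filter
          (fun p => decide (1 < p.2.length))).map pvRep) := by
  induction l generalizing pre u dm dr with
  | nil => simp [PySem.List.enumerate_nil, pvGroup]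
  | cons r t ih =>
    have hslice : PySem.List.slice recs none (some (pre.length : Int)) = pre := by
      rw [PySem.List.slice_to_natCast, h]
      simp
    rw [PySem.List.enumerate_cons, List.foldl_cons]
    by_cases hc : pre.any (fun q => q.1 == r.1) = true
    · -- not a first occurrence: skipped, and filtered out of the group list
      have hstep : pvStepB recs (u, dm, dr) ((pre.length : Int), r) = (u, dm, dr) := by
        simp only [pvStepB, hslice]
        rw [if_pos hc]
      have hpre' : recs = (pre ++ [r]) ++ t := by simp [h]
      have hfeq : t.filter (fun x => !((pre ++ [r]).any (fun q => q.1 == x.1)))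
          = t.filter (fun x => !(pre.any (fun q => q.1 == x.1))) := by
        refine List.filter_congr (fun x _ => ?_)
        by_cases hx : (r.1 == x.1) = true
        · have hx' : r.1 = x.1 := by simpa using hx
          have : pre.any (fun q => q.1 == x.1) = true := by rw [← hx']; exact hc
          simp [this]
        · simp [hx]
      have := ih (pre ++ [r]) u dm dr hpre'
      rw [hstep, show ((pre.length : Int) + 1) = (((pre ++ [r]).length : Nat) : Int) by
        simp, this, hfeq,
        List.filter_cons_of_neg (by rw [hc]; simp)]
    · -- first occurrence: emit this group
      have hc' : pre.any (fun q => q.1 == r.1) = false := Bool.eq_false_iff.mpr hc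
      have hprefilter : pre.filter (fun q => q.1 == r.1) = [] := by
        rw [List.filter_eq_nil_iff]
        intro q hq
        intro hqr
        have hany : pre.any (fun q => q.1 == r.1) = true := List.any_eq_true.mpr ⟨q, hq, hqr⟩
        rw [hany] at hc'
        exact absurd hc' (by simp)
      have hids : (recs.filter (fun q => q.1 == r.1)).map Prod.snd
          = r.2 :: (t.filter (fun q => q.1 == r.1)).map Prod.snd := by
        rw [h, List.filter_append, hprefilter, List.nil_append,
          List.filter_cons_of_pos (by simp)]
        simp
      have hgrp : pvGroup ((r :: t).filter (fun x => !(pre.any (fun q => q.1 == x.1))))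
          = (r.1, r.2 :: (t.filter (fun q => q.1 == r.1)).map Prod.snd) ::
            pvGroup (t.filter (fun x => !((pre ++ [r]).any (fun q => q.1 == x.1)))) := by
        rw [List.filter_cons_of_pos (by simp [hc']), pvGroup_cons]
        congr 2
        · -- within-group ids: the pre-filter is invisible on this gloss
          refine congrArg (fun l => r.2 :: List.map Prod.snd l) ?_
          rw [List.filter_filter]
          refine List.filter_congr (fun x _ => ?_)
          by_cases hx : (x.1 == r.1) = true
          · have hx' : x.1 = r.1 := by simpa using hx
            simp [hx, hx', hc']
          · simp [hx]
        · -- remaining records: ban r.1 as well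
          rw [List.filter_filter]
          refine List.filter_congr (fun x _ => ?_)
          by_cases hx : (x.1 == r.1) = true
          · have hx' : x.1 = r.1 := by simpa using hx
            simp [hx', hc']
          · have hx' : (x.1 == r.1) = false := by simpa using hx
            have hx2 : (r.1 == x.1) = false := by
              refine beq_eq_false_iff_ne.mpr (fun hh => ?_)
              exact absurd (by simpa using hh.symm) (by simpa using hx)
            simp only [hx', hx2, List.any_append, List.any_cons, List.any_nil,
              Bool.or_false, Bool.not_or, bne, Bool.and_comm]
            simp
      set ids := (recs.filter (fun q => q.1 == r.1)).map Prod.snd with hids'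
      by_cases hlen : 1 < ids.length
      · have hstep : pvStepB recs (u, dm, dr) ((pre.length : Int), r)
            = (u ++ [pvEq r.1 r.2], dm ++ (ids.drop 1).map (pvEq r.1),
               dr ++ [pvRep (r.1, ids)]) := by
          simp only [pvStepB, hslice]
          rw [if_neg (by simp [hc']), ← hids', if_pos hlen]
        rw [hstep, show ((pre.length : Int) + 1) = (((pre ++ [r]).length : Nat) : Int) by simp,
          ih (pre ++ [r]) _ _ _ (by simp [h]), hgrp]
        have hflen : (decide (1 < (r.2 :: (t.filter (fun q => q.1 == r.1)).map Prod.snd).length)) = true := by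
          rw [← hids]; simpa using hlen
        rw [hids]
        simp only [List.filter_cons, hflen]
        simp
      · have hstep : pvStepB recs (u, dm, dr) ((pre.length : Int), r)
            = (u ++ [pvEq r.1 r.2], dm, dr) := by
          simp only [pvStepB, hslice]
          rw [if_neg (by simp [hc']), ← hids', if_neg hlen]
        rw [hstep, show ((pre.length : Int) + 1) = (((pre ++ [r]).length : Nat) : Int) by simp,
          ih (pre ++ [r]) _ _ _ (by simp [h]), hgrp]
        have hflen : (decide (1 < (r.2 :: (t.filter (fun q => q.1 == r.1)).map Prod.snd).length)) = false := by
          rw [← hids]; simpa using hlen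
        have hXnil : (t.filter (fun q => q.1 == r.1)).map Prod.snd = ([] : List String) := by
          have hl := congrArg List.length hids
          simp only [List.length_cons] at hl
          rw [← List.length_eq_zero_iff]
          omega
        simp only [List.filter_cons, hflen]
        simp [hXnil]

-- ===== VERDICT (by name: the statement is the Claim_ definition above) =====
theorem process_json_mappings_spec : Claim_equal_process_json_mappings := by
  intro gloss_dict _
  unfold Spec_process_json_mappings
  rw [show process_json_mappings gloss_dict
        = (gloss_dict.foldl pvStepA PySem.Dict.empty).items.foldl pvClassifyA ([], [], [])
      from rfl,
    show process_json_mappings_alt gloss_dict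
        = (PySem.List.enumerate (pvRecs gloss_dict) 0).foldl
            (pvStepB (pvRecs gloss_dict)) ([], [], [])
      from rfl,
    pvFoldA_recs]
  obtain ⟨hitems, -⟩ := pvDictGroup (pvRecs gloss_dict) PySem.Dict.empty (by simp)
  have hfilter : (pvRecs gloss_dict).filter
      (fun r => !((PySem.Dict.empty : PySem.Dict String (List String)).contains r.1))
      = pvRecs gloss_dict := by
    refine List.filter_eq_self.mpr (fun x _ => by simp)
  rw [hitems, hfilter, show (PySem.Dict.empty : PySem.Dict String (List String)).items = [] from rfl,
    List.map_nil, List.nil_append]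
  rw [pvClassify_char _ (pvGroup_ne_nil _) [] [] []]
  have hB := pvBLoop (pvRecs gloss_dict) [] (pvRecs gloss_dict) [] [] [] (by simp)
  simp only [List.length_nil, Nat.cast_zero, List.any_nil, Bool.not_false, List.filter_true] at hB
  rw [hB]
  refine Prod.ext ?_ (Prod.ext ?_ ?_)
  · simp only [List.nil_append]
    refine List.map_congr_left (fun q hq => ?_)
    have hq2 : q.2 ≠ [] := pvGroup_ne_nil _ q hq
    simp [pvItemEq, pvGetD_zero]
  · simp only [List.nil_append]
    exact (pvFlatMap_filter _).symm
  · simp
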